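-- pv_equiv track=rewrite | github.com/AcidNick/Python_inf100_UiB_projects | Lab6/string_sum.py | get_line_with_highest_stringsum
-- ===== SOURCE A (Python) =====
-- def get_stringsum(s: str) -> int:
--     items = s.split(' ')
--     summert: int = 0
--     for item in items:
--         try:
--             number: int = int(item)
--         except ValueError:
--             continue
--         else:
--             summert += number
--     return summert
--
-- def get_line_with_highest_stringsum(s: str) -> tuple:
--     line = s.strip().splitlines()
--     highest = get_stringsum(line[0])
--     i = 1
--     t = get_stringsum(line[0])
--     r = line[0]
--     for n in range(len(line)):
--         current = get_stringsum(line[n])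
--         if current > highest:
--             highest = current
--             i = n+1
--             t = current
--             r = line[n]
--     return i, t, r
-- ===== SOURCE B (Python) =====
-- def _as_int(token):
--     try:
--         return int(token)
--     except ValueError:
--         return None
--
--
-- def get_stringsum(s: str) -> int:
--     return sum(v for v in map(_as_int, s.split(' ')) if v is not None)
--
--
-- def get_line_with_highest_stringsum(s: str) -> tuple:
--     lines = s.strip().splitlines()
--     ranked = sorted(enumerate(lines), key=lambda p: -get_stringsum(p[1]))
--     idx, line = ranked[0]
--     return idx + 1, get_stringsum(line), line
-- ===== Notes on version B (the rewrite author's own statement) =====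
-- stated objective: alternative
-- what changed: Replaces A's single-pass running-max loop (with its redundant highest/i/t/r state and double summing of line[0]) by a sort-based argmax: stably sort the enumerated lines by descending stringsum and take the head; stability makes ties pick the first maximal line, as A does.
import Mathlib
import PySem

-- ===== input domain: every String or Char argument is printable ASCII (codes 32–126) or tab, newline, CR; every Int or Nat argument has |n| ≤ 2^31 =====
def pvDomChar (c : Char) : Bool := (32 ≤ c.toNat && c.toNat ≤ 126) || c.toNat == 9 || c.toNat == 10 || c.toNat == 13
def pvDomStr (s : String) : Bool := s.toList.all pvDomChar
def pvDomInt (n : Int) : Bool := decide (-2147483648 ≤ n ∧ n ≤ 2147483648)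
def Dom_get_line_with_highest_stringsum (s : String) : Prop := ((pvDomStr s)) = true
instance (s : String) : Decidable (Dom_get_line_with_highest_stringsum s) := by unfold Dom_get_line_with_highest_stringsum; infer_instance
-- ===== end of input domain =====

-- B replaces A's single-pass running-max loop by a sort-based argmax (stable sort of the
-- enumerated lines by descending stringsum, take the head); objective: alternative.

-- ===== PORT A =====
def get_stringsum (s : String) : Int :=
  let items := (PySem.Str.split? s " ").getD []   -- sep " " ≠ "", so split? is always some
  items.foldl (fun summert item =>
    match PySem.Int.ofStr? item with
    | none => summert
    | some number => summert + number) 0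

-- A's loop body as a named helper (literal transliteration of the body)
def pvStepA (st : Int × Int × Int × String) (p : String × Nat) : Int × Int × Int × String :=
  let current := get_stringsum p.1
  if current > st.1 then (current, (p.2 : Int) + 1, current, p.1) else st

def get_line_with_highest_stringsum (s : String) : Int × Int × String :=
  let line := PySem.Str.splitlines (PySem.Str.strip s)
  match line with
  | [] => (0, 0, "")        -- line[0] raises IndexError here; excluded by Pre_
  | l0 :: _ =>
    let st := (line.zipIdx 0).foldl pvStepA (get_stringsum l0, 1, get_stringsum l0, l0)
    (st.2.1, st.2.2.1, st.2.2.2)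

-- ===== PORT B =====
def pvAsInt? (token : String) : Option Int := PySem.Int.ofStr? token

def get_stringsum_alt (s : String) : Int :=
  (((((PySem.Str.split? s " ").getD []).map pvAsInt?).filterMap id)).sum

def get_line_with_highest_stringsum_alt (s : String) : Int × Int × String :=
  let lines := PySem.Str.splitlines (PySem.Str.strip s)
  let ranked := PySem.List.sorted (PySem.List.enumerate lines 0)
    (fun p => -(get_stringsum_alt p.2))
  match PySem.List.pyGet? ranked 0 with
  | none => (0, 0, "")      -- ranked[0] raises IndexError here; excluded by Pre_
  | some (idx, line) => (idx + 1, get_stringsum_alt line, line)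

-- ===== PRECONDITION & SPEC =====
-- Pre_ excludes exactly the inputs that strip to the empty string: there both A and B raise
-- IndexError (A on line[0], B on ranked[0]).
def Pre_get_line_with_highest_stringsum (s : String) : Prop :=
  PySem.Str.splitlines (PySem.Str.strip s) ≠ []
instance (s : String) : Decidable (Pre_get_line_with_highest_stringsum s) := by
  unfold Pre_get_line_with_highest_stringsum; infer_instance

def pvWitness_get_line_with_highest_stringsum : String := "1 2\n3"

def Spec_get_line_with_highest_stringsum (s : String) (out : Int × Int × String) : Prop :=
  out = get_line_with_highest_stringsum_alt s
instance (s : String) (out : Int × Int × String) :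
    Decidable (Spec_get_line_with_highest_stringsum s out) := by
  unfold Spec_get_line_with_highest_stringsum; infer_instance

-- ===== CLAIM (what is proved, stated in full; the proofs are below) =====
def Claim_equal_get_line_with_highest_stringsum : Prop :=
  ∀ (s : String), Dom_get_line_with_highest_stringsum s →
    Pre_get_line_with_highest_stringsum s →
    Spec_get_line_with_highest_stringsum s (get_line_with_highest_stringsum s)

-- ===== LEMMAS AND PROOFS =====

-- The two per-line sums agree.
lemma sum_foldl_eq (items : List String) (a : Int) :
    items.foldl (fun summert item =>
      match PySem.Int.ofStr? item with
      | none => summert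
      | some number => summert + number) a
      = a + ((items.map pvAsInt?).filterMap id).sum := by
  induction items generalizing a with
  | nil => simp
  | cons x t ih =>
    simp only [List.foldl_cons, List.map_cons, List.filterMap_cons]
    cases h : PySem.Int.ofStr? x with
    | none => simp [pvAsInt?, h, ih]
    | some n => simp [pvAsInt?, h, ih]; ring

lemma stringsum_eq (s : String) : get_stringsum_alt s = get_stringsum s := by
  simp [get_stringsum, get_stringsum_alt, sum_foldl_eq]

-- insertBy with a strict-< test: head evolves exactly as a "keep the first minimum" fold.
lemma insertBy_cons (key : (Int × String) → Int) (x h : Int × String) (t : List (Int × String)) :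
    PySem.List.insertBy (fun a b => decide (key a < key b)) x (h :: t)
      = if key x < key h then x :: h :: t
        else h :: PySem.List.insertBy (fun a b => decide (key a < key b)) x t := by
  by_cases hk : key x < key h <;> simp [PySem.List.insertBy, hk]

-- Head of the insertion-sort fold, starting from a list whose head is a minimum:
-- it is the "first strict minimum" running fold over the inserted elements.
lemma foldl_insertBy_head (key : (Int × String) → Int) (xs : List (Int × String))
    (h : Int × String) (t : List (Int × String)) (hmin : ∀ y ∈ t, key h ≤ key y) :
    ∃ t', xs.foldl (fun acc x => PySem.List.insertBy (fun a b => decide (key a < key b)) x acc)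
        (h :: t)
      = (xs.foldl (fun b x => if key x < key b then x else b) h) :: t'
      ∧ ∀ y ∈ t', key (xs.foldl (fun b x => if key x < key b then x else b) h) ≤ key y := by
  induction xs generalizing h t with
  | nil => exact ⟨t, rfl, hmin⟩
  | cons x rest ih =>
    simp only [List.foldl_cons, insertBy_cons]
    by_cases hk : key x < key h
    · simp only [if_pos hk]
      exact ih x (h :: t) (by
        intro y hy
        rcases List.mem_cons.mp hy with rfl | hy'
        · exact hk.le
        · exact le_trans hk.le (hmin y hy'))
    · simp only [if_neg hk]
      exact ih h (PySem.List.insertBy (fun a b => decide (key a < key b)) x t) (by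
        intro y hy
        rcases (PySem.List.mem_insertBy _ x y t).mp hy with rfl | hy'
        · exact not_lt.mp hk
        · exact hmin y hy')

-- A's loop, started in the canonical state for a current best b, tracks the
-- "first strict maximum" fold over the enumerated remaining lines.
lemma A_loop (xs : List String) (k : Nat) (b : Int × String) :
    (xs.zipIdx k).foldl pvStepA (get_stringsum b.2, b.1 + 1, get_stringsum b.2, b.2)
      = (get_stringsum ((PySem.List.enumerate xs (k : Int)).foldl
            (fun c x => if get_stringsum c.2 < get_stringsum x.2 then x else c) b).2,
         ((PySem.List.enumerate xs (k : Int)).foldl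
            (fun c x => if get_stringsum c.2 < get_stringsum x.2 then x else c) b).1 + 1,
         get_stringsum ((PySem.List.enumerate xs (k : Int)).foldl
            (fun c x => if get_stringsum c.2 < get_stringsum x.2 then x else c) b).2,
         ((PySem.List.enumerate xs (k : Int)).foldl
            (fun c x => if get_stringsum c.2 < get_stringsum x.2 then x else c) b).2) := by
  induction xs generalizing k b with
  | nil => simp [PySem.List.enumerate]
  | cons x rest ih =>
    rw [List.zipIdx_cons, List.foldl_cons, PySem.List.enumerate_cons, List.foldl_cons]
    by_cases hx : get_stringsum b.2 < get_stringsum x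
    · rw [show pvStepA (get_stringsum b.2, b.1 + 1, get_stringsum b.2, b.2) (x, k)
          = (get_stringsum x, (k : Int) + 1, get_stringsum x, x) by
        simp [pvStepA, hx]]
      have := ih (k + 1) ((k : Int), x)
      rw [if_pos hx]
      simpa [Nat.cast_add] using this
    · rw [show pvStepA (get_stringsum b.2, b.1 + 1, get_stringsum b.2, b.2) (x, k)
          = (get_stringsum b.2, b.1 + 1, get_stringsum b.2, b.2) by
        simp [pvStepA, hx]]
      rw [if_neg hx]
      have := ih (k + 1) b
      simpa [Nat.cast_add] using this

-- ===== VERDICT (by name: the statement is the Claim_ definition above) =====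
theorem get_line_with_highest_stringsum_spec :
    Claim_equal_get_line_with_highest_stringsum := by
  intro s _ hpre
  unfold Spec_get_line_with_highest_stringsum
  unfold get_line_with_highest_stringsum get_line_with_highest_stringsum_alt
  unfold Pre_get_line_with_highest_stringsum at hpre
  cases hl : PySem.Str.splitlines (PySem.Str.strip s) with
  | nil => exact absurd hl hpre
  | cons l0 rest =>
    dsimp only
    -- B side: name the sorted list's head via the insertion-sort fold
    rw [PySem.List.sorted_eq_foldl_insertBy, PySem.List.enumerate_cons, List.foldl_cons]
    rw [show PySem.List.insertBy
          (fun a b => decide ((fun p : Int × String => -(get_stringsum_alt p.2)) a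
            < (fun p : Int × String => -(get_stringsum_alt p.2)) b)) (0, l0) ([] : List (Int × String))
        = [(0, l0)] from rfl]
    obtain ⟨t', ht', -⟩ := foldl_insertBy_head (fun p => -(get_stringsum_alt p.2))
      (PySem.List.enumerate rest (0 + 1)) (0, l0) [] (by intro y hy; simp at hy)
    rw [ht']
    -- the B-side "first minimum of -sum" fold is the "first strict maximum of sum" fold
    simp only [stringsum_eq, neg_lt_neg_iff]
    -- A side
    have hA := A_loop (l0 :: rest) 0 ((0 : Int), l0)
    rw [PySem.List.enumerate_cons, List.foldl_cons] at hA
    rw [if_neg (lt_irrefl _)] at hA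
    norm_num at hA ⊢
    rw [hA]
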